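-- pv_equiv track=rewrite | github.com/kobayashi9/NA-GTA-MAC | NA_GTA_MAC/based_on_katz_lindell_na_gta_mac_generic.py | remove_id
-- ===== SOURCE A (Python) =====
-- def remove_id(vfy_im_tuples_list, Tu_list, vfy_Tu_list, vfy_id_list):
-- 	Js_list = dict(vfy_im_tuples_list)
-- 	gtt_num = len(Tu_list)
-- 	sample_num = len(vfy_im_tuples_list)
-- 	for i in range(gtt_num):
-- 		if(Tu_list[i] == vfy_Tu_list[i]): #タグが一致しているとき
-- 			for j in range(len(vfy_id_list[i])):
-- 				if(vfy_id_list[i][j] in Js_list):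
-- 					Js_list.pop(vfy_id_list[i][j])
-- 		else:
-- 			continue
-- 	return Js_list
-- ===== SOURCE B (Python) =====
-- def remove_id(vfy_im_tuples_list, Tu_list, vfy_Tu_list, vfy_id_list):
-- 	remove = set()
-- 	for i in range(len(Tu_list)):
-- 		if Tu_list[i] == vfy_Tu_list[i]:
-- 			remove.update(vfy_id_list[i])
-- 	return {k: v for k, v in vfy_im_tuples_list if k not in remove}
-- ===== Notes on version B (the rewrite author's own statement) =====
-- stated objective: simpler
-- what changed: A interleaves building a dict with membership-checked pop() calls in a nested loop; B first collects all ids to delete into a set in one pass and then builds the result in a single filtering dict comprehension, never constructing the unfiltered dict.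
import Mathlib
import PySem

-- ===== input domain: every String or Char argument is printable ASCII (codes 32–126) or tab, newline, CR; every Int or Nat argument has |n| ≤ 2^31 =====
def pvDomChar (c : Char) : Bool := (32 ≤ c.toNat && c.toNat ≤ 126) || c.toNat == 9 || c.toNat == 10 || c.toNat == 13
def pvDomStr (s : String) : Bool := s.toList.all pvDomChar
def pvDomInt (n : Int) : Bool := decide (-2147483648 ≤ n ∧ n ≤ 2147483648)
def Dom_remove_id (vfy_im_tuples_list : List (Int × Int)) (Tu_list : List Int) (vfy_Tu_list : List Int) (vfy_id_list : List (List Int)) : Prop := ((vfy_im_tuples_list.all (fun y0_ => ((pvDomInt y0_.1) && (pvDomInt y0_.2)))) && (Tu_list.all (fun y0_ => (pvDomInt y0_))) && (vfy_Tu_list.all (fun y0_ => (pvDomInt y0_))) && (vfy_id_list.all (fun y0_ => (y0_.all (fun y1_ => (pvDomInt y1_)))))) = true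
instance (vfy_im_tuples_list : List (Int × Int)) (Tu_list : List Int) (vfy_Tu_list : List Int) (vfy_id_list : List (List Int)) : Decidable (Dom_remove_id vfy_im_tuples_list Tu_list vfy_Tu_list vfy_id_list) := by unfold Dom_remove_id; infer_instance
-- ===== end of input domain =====

-- B replaces A's build-dict-then-pop nested loops by: one pass collecting the ids to
-- delete into a set, then a single filtering dict comprehension (objective: simpler).

-- ===== PORT A =====
def remove_id (vfy_im_tuples_list : List (Int × Int)) (Tu_list : List Int) (vfy_Tu_list : List Int) (vfy_id_list : List (List Int)) : List (Int × Int) :=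
  let Js_list0 : PySem.Dict Int Int := PySem.Dict.ofList vfy_im_tuples_list
  let gtt_num : Int := (Tu_list.length : Int)
  let _sample_num : Int := (vfy_im_tuples_list.length : Int)
  let Js_list :=
    (PySem.List.pyRange 0 gtt_num 1).foldl (fun Js i =>
      if PySem.List.pyGetD Tu_list i 0 = PySem.List.pyGetD vfy_Tu_list i 0 then
        (PySem.List.pyRange 0 ((PySem.List.pyGetD vfy_id_list i []).length : Int) 1).foldl
          (fun Js j =>
            if Js.contains (PySem.List.pyGetD (PySem.List.pyGetD vfy_id_list i []) j 0) then
              Js.erase (PySem.List.pyGetD (PySem.List.pyGetD vfy_id_list i []) j 0)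
            else Js) Js
      else Js) Js_list0
  Js_list.items

-- ===== PORT B =====
def remove_id_alt (vfy_im_tuples_list : List (Int × Int)) (Tu_list : List Int) (vfy_Tu_list : List Int) (vfy_id_list : List (List Int)) : List (Int × Int) :=
  let remove : PySem.Set Int :=
    (PySem.List.pyRange 0 (Tu_list.length : Int) 1).foldl (fun s i =>
      if PySem.List.pyGetD Tu_list i 0 = PySem.List.pyGetD vfy_Tu_list i 0 then
        PySem.Set.update s (PySem.List.pyGetD vfy_id_list i [])
      else s) PySem.Set.empty
  (PySem.Dict.ofList (vfy_im_tuples_list.filter (fun p => !(PySem.Set.contains remove p.1)))).items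

-- ===== PRECONDITION & SPEC =====
-- Pre_ excludes exactly the inputs on which Python A raises IndexError: it reads
-- vfy_Tu_list[i] for every i < len(Tu_list), and vfy_id_list[i] whenever the tags at i match.
def Pre_remove_id (vfy_im_tuples_list : List (Int × Int)) (Tu_list : List Int) (vfy_Tu_list : List Int) (vfy_id_list : List (List Int)) : Prop :=
  Tu_list.length ≤ vfy_Tu_list.length ∧
  ∀ i : Nat, i < Tu_list.length → Tu_list.getD i 0 = vfy_Tu_list.getD i 0 → i < vfy_id_list.length
instance (vfy_im_tuples_list : List (Int × Int)) (Tu_list : List Int) (vfy_Tu_list : List Int) (vfy_id_list : List (List Int)) : Decidable (Pre_remove_id vfy_im_tuples_list Tu_list vfy_Tu_list vfy_id_list) := by unfold Pre_remove_id; infer_instance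
def pvWitness_remove_id : (List (Int × Int)) × List Int × List Int × List (List Int) :=
  ([(1, 2), (3, 4)], [5, 6], [5, 7], [[1], []])
def Spec_remove_id (vfy_im_tuples_list : List (Int × Int)) (Tu_list : List Int) (vfy_Tu_list : List Int) (vfy_id_list : List (List Int)) (out : List (Int × Int)) : Prop := out = remove_id_alt vfy_im_tuples_list Tu_list vfy_Tu_list vfy_id_list
instance (vfy_im_tuples_list : List (Int × Int)) (Tu_list : List Int) (vfy_Tu_list : List Int) (vfy_id_list : List (List Int)) (out : List (Int × Int)) : Decidable (Spec_remove_id vfy_im_tuples_list Tu_list vfy_Tu_list vfy_id_list out) := by unfold Spec_remove_id; infer_instance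

-- ===== CLAIM (what is proved, stated in full; the proofs are below) =====
def Claim_equal_remove_id : Prop := ∀ (vfy_im_tuples_list : List (Int × Int)) (Tu_list : List Int) (vfy_Tu_list : List Int) (vfy_id_list : List (List Int)), Dom_remove_id vfy_im_tuples_list Tu_list vfy_Tu_list vfy_id_list → Pre_remove_id vfy_im_tuples_list Tu_list vfy_Tu_list vfy_id_list → Spec_remove_id vfy_im_tuples_list Tu_list vfy_Tu_list vfy_id_list (remove_id vfy_im_tuples_list Tu_list vfy_Tu_list vfy_id_list)

-- ===== LEMMAS AND PROOFS =====

-- the flattened list of ids scheduled for removal after the first n outer iterations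
def remKeys (Tu_list vfy_Tu_list : List Int) (vfy_id_list : List (List Int)) : Nat → List Int
  | 0 => []
  | n + 1 => remKeys Tu_list vfy_Tu_list vfy_id_list n ++
      (if Tu_list.getD n 0 = vfy_Tu_list.getD n 0 then vfy_id_list.getD n [] else [])

-- 'if contains then erase else' is just erase
lemma dict_ifErase (d : PySem.Dict Int Int) (k : Int) :
    (if d.contains k then d.erase k else d) = d.erase k := by
  by_cases h : d.contains k = true
  · simp [h]
  · have hcf : d.contains k = false := by simpa using h
    rw [hcf]
    simp only [Bool.false_eq_true, if_false]
    apply PySem.Dict.ext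
    show d.items = d.items.filter _
    rw [eq_comm, List.filter_eq_self]
    intro p hp
    simp only [PySem.Dict.contains, List.any_eq_true, not_exists, not_and,
      Bool.not_eq_true] at h ⊢
    simp [h p hp]

-- folding erase over a key list is one filter
lemma foldl_erase_filter (ys : List Int) (d : PySem.Dict Int Int) :
    ys.foldl (fun Js k => Js.erase k) d
      = ⟨d.items.filter (fun p => decide (p.1 ∉ ys))⟩ := by
  induction ys generalizing d with
  | nil => simp
  | cons x ys ih =>
    simp only [List.foldl_cons]
    rw [ih]
    apply PySem.Dict.ext
    show ((d.erase x).items.filter _) = _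
    simp only [PySem.Dict.erase, List.filter_filter]
    apply List.filter_congr
    intro p _
    by_cases hx : p.1 = x <;> by_cases hy : p.1 ∈ ys <;> simp [hx, hy]

-- the outer loop of A: dict after n iterations = initial dict filtered by remKeys n
lemma A_outer (Tu_list vfy_Tu_list : List Int) (vfy_id_list : List (List Int))
    (n : Nat) (d0 : PySem.Dict Int Int) :
    (PySem.List.pyRange 0 (n : Int) 1).foldl (fun Js i =>
      if PySem.List.pyGetD Tu_list i 0 = PySem.List.pyGetD vfy_Tu_list i 0 then
        (PySem.List.pyRange 0 ((PySem.List.pyGetD vfy_id_list i []).length : Int) 1).foldl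
          (fun Js j =>
            if Js.contains (PySem.List.pyGetD (PySem.List.pyGetD vfy_id_list i []) j 0) then
              Js.erase (PySem.List.pyGetD (PySem.List.pyGetD vfy_id_list i []) j 0)
            else Js) Js
      else Js) d0
      = ⟨d0.items.filter (fun p => decide (p.1 ∉ remKeys Tu_list vfy_Tu_list vfy_id_list n))⟩ := by
  induction n with
  | zero =>
    rw [Nat.cast_zero, PySem.List.pyRange_one_eq_nil (le_refl 0)]
    simp [remKeys]
  | succ n ih =>
    have hcast : ((n + 1 : Nat) : Int) = (n : Int) + 1 := by push_cast; ring
    rw [hcast, PySem.List.pyRange_one_succ_right (by omega), List.foldl_append, ih]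
    simp only [List.foldl_cons, List.foldl_nil, PySem.List.pyGetD_natCast, dict_ifErase]
    by_cases h : Tu_list.getD n 0 = vfy_Tu_list.getD n 0
    · rw [if_pos h]
      have hinner := PySem.List.foldl_pyRange_zero_pyGetD' (vfy_id_list.getD n []) 0
        (fun (Js : PySem.Dict Int Int) k => Js.erase k)
        (⟨d0.items.filter (fun p => decide (p.1 ∉ remKeys Tu_list vfy_Tu_list vfy_id_list n))⟩ :
          PySem.Dict Int Int)
      rw [hinner, foldl_erase_filter]
      apply PySem.Dict.ext
      show (List.filter _ (List.filter _ _)) = _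
      rw [List.filter_filter]
      apply List.filter_congr
      intro p _
      simp only [remKeys, if_pos h, List.mem_append, not_or, Bool.decide_and, Bool.and_comm]
    · rw [if_neg h]
      apply PySem.Dict.ext
      show List.filter _ _ = List.filter _ _
      apply List.filter_congr
      intro p _
      simp only [remKeys]
      simp only [List.append_nil, if_neg h]

-- the remove-set loop of B: membership after n iterations = membership in remKeys n
lemma B_set (Tu_list vfy_Tu_list : List Int) (vfy_id_list : List (List Int)) (n : Nat) (x : Int) :
    (x ∈ (PySem.List.pyRange 0 (n : Int) 1).foldl (fun s i =>
      if PySem.List.pyGetD Tu_list i 0 = PySem.List.pyGetD vfy_Tu_list i 0 then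
        PySem.Set.update s (PySem.List.pyGetD vfy_id_list i [])
      else s) (PySem.Set.empty : PySem.Set Int))
      ↔ x ∈ remKeys Tu_list vfy_Tu_list vfy_id_list n := by
  induction n with
  | zero =>
    rw [Nat.cast_zero, PySem.List.pyRange_one_eq_nil (le_refl 0)]
    simp [remKeys, PySem.Set.empty]
  | succ n ih =>
    have hcast : ((n + 1 : Nat) : Int) = (n : Int) + 1 := by push_cast; ring
    rw [hcast, PySem.List.pyRange_one_succ_right (by omega), List.foldl_append]
    simp only [List.foldl_cons, List.foldl_nil, PySem.List.pyGetD_natCast]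
    by_cases h : Tu_list.getD n 0 = vfy_Tu_list.getD n 0
    · rw [if_pos h, PySem.Set.mem_update, ih]
      simp only [remKeys, List.mem_append]
      rw [if_pos h]
    · rw [if_neg h, ih]
      simp only [remKeys, List.mem_append]
      rw [if_neg h]
      simp

-- key-filtered insert: filtering items by a key predicate commutes with one insert
lemma insert_filter_items (q : Int → Bool) (d : PySem.Dict Int Int) (k : Int) (v : Int) :
    ((d.insert k v).items).filter (fun p => q p.1)
      = if q k then
          ((PySem.Dict.mk (d.items.filter (fun p => q p.1)) : PySem.Dict Int Int).insert k v).items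
        else d.items.filter (fun p => q p.1) := by
  have hfe : ∀ p : Int × Int, (p.1 == k) = true → p.1 = k := fun p h => by simpa using h
  have hcont : (PySem.Dict.mk (d.items.filter (fun p => q p.1)) : PySem.Dict Int Int).contains k
      = (q k && d.contains k) := by
    simp only [PySem.Dict.contains]
    show (List.filter _ _).any _ = _
    rw [List.any_filter]
    by_cases hq : q k = true
    · simp only [hq, Bool.true_and]
      apply List.any_congr rfl
      intro p
      by_cases hpk : (p.1 == k) = true
      · rw [hfe p hpk]
        simp [hq]
      · simp [hpk]
    · have hq' : q k = false := by simpa using hq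
      simp only [hq', Bool.false_and, List.any_eq_false]
      intro p _
      by_cases hpk : (p.1 == k) = true
      · rw [hfe p hpk]
        simp [hq']
      · simp [hpk]
  by_cases hq : q k = true
  · rw [if_pos hq]
    by_cases hc : d.contains k = true
    · have hc' : (PySem.Dict.mk (d.items.filter (fun p => q p.1)) : PySem.Dict Int Int).contains k
          = true := by rw [hcont, hq, hc]; rfl
      simp only [PySem.Dict.insert, hc, hc', if_true]
      show (d.items.map _).filter _ = (d.items.filter _).map _
      rw [List.filter_map]
      congr 1
      apply List.filter_congr
      intro p _
      show q (if (p.1 == k) = true then (k, v) else p).1 = q p.1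
      by_cases hpk : (p.1 == k) = true
      · rw [if_pos hpk, hfe p hpk]
      · rw [if_neg hpk]
    · have hcf : d.contains k = false := by simpa using hc
      have hc' : (PySem.Dict.mk (d.items.filter (fun p => q p.1)) : PySem.Dict Int Int).contains k
          = false := by rw [hcont, hcf]; simp
      simp only [PySem.Dict.insert, hc, hc']
      simp only [Bool.false_eq_true, if_false]
      show (d.items ++ [(k, v)]).filter _ = d.items.filter _ ++ [(k, v)]
      rw [List.filter_append]
      simp [hq]
  · have hq' : q k = false := by simpa using hq
    rw [if_neg hq]
    by_cases hc : d.contains k = true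
    · simp only [PySem.Dict.insert, hc, if_true]
      show (d.items.map _).filter _ = d.items.filter _
      rw [List.filter_map]
      have h1 : d.items.filter
            ((fun p : Int × Int => q p.1) ∘ (fun p : Int × Int => if p.1 == k then (k, v) else p))
          = d.items.filter (fun p => q p.1) := by
        apply List.filter_congr
        intro p _
        show q (if (p.1 == k) = true then (k, v) else p).1 = q p.1
        by_cases hpk : (p.1 == k) = true
        · rw [if_pos hpk, hfe p hpk]
        · rw [if_neg hpk]
      rw [h1]
      conv_rhs => rw [← List.map_id (d.items.filter (fun p => q p.1))]
      apply List.map_congr_left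
      intro p hp
      have hqp : q p.1 = true := by
        have := (List.mem_filter.mp hp).2
        simpa using this
      have hpk : (p.1 == k) = false := by
        cases hx : (p.1 == k) with
        | false => rfl
        | true =>
          rw [hfe p hx] at hqp
          rw [hqp] at hq'
          simp at hq'
      simp [hpk]
    · have hcf : d.contains k = false := by simpa using hc
      simp only [PySem.Dict.insert, hcf]
      simp only [Bool.false_eq_true, if_false]
      show (d.items ++ [(k, v)]).filter _ = d.items.filter _
      rw [List.filter_append]
      simp [hq']

-- filtering by a key predicate commutes with building a dict from a pair list
lemma update_filter (q : Int → Bool) (pairs : List (Int × Int)) (d : PySem.Dict Int Int) :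
    (PySem.Dict.update (PySem.Dict.mk (d.items.filter (fun p => q p.1)) : PySem.Dict Int Int)
        (pairs.filter (fun p => q p.1))).items
      = ((PySem.Dict.update d pairs).items).filter (fun p => q p.1) := by
  induction pairs generalizing d with
  | nil => simp [PySem.Dict.update]
  | cons p rest ih =>
    by_cases hq : q p.1 = true
    · simp only [List.filter_cons, hq, if_true, PySem.Dict.update, List.foldl_cons]
      have h := insert_filter_items q d p.1 p.2
      rw [if_pos hq] at h
      have heq : (PySem.Dict.mk (d.items.filter (fun x => q x.1)) : PySem.Dict Int Int).insert p.1 p.2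
          = ⟨((d.insert p.1 p.2).items).filter (fun x => q x.1)⟩ := by
        apply PySem.Dict.ext; rw [h]
      rw [heq]
      exact ih (d.insert p.1 p.2)
    · have hq' : q p.1 = false := by simpa using hq
      simp only [List.filter_cons, hq']
      simp only [Bool.false_eq_true, if_false, PySem.Dict.update, List.foldl_cons]
      have h := insert_filter_items q d p.1 p.2
      rw [if_neg hq] at h
      have heq : (PySem.Dict.mk (d.items.filter (fun x => q x.1)) : PySem.Dict Int Int)
          = ⟨((d.insert p.1 p.2).items).filter (fun x => q x.1)⟩ := by
        apply PySem.Dict.ext; rw [h]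
      rw [heq]
      exact ih (d.insert p.1 p.2)

-- ===== VERDICT (by name: the statement is the Claim_ definition above) =====
theorem remove_id_spec : Claim_equal_remove_id := by
  intro l Tu vTu vid _ _
  show remove_id l Tu vTu vid = remove_id_alt l Tu vTu vid
  show ((PySem.List.pyRange 0 ((Tu.length : Int)) 1).foldl (fun Js i =>
      if PySem.List.pyGetD Tu i 0 = PySem.List.pyGetD vTu i 0 then
        (PySem.List.pyRange 0 ((PySem.List.pyGetD vid i []).length : Int) 1).foldl
          (fun Js j =>
            if Js.contains (PySem.List.pyGetD (PySem.List.pyGetD vid i []) j 0) then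
              Js.erase (PySem.List.pyGetD (PySem.List.pyGetD vid i []) j 0)
            else Js) Js
      else Js) (PySem.Dict.ofList l)).items
    = (PySem.Dict.ofList (l.filter (fun p => !(PySem.Set.contains
        ((PySem.List.pyRange 0 (Tu.length : Int) 1).foldl (fun s i =>
          if PySem.List.pyGetD Tu i 0 = PySem.List.pyGetD vTu i 0 then
            PySem.Set.update s (PySem.List.pyGetD vid i [])
          else s) (PySem.Set.empty : PySem.Set Int)) p.1)))).items
  rw [A_outer Tu vTu vid Tu.length (PySem.Dict.ofList l)]
  have hq : (fun p : Int × Int => !(PySem.Set.contains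
        ((PySem.List.pyRange 0 (Tu.length : Int) 1).foldl (fun s i =>
          if PySem.List.pyGetD Tu i 0 = PySem.List.pyGetD vTu i 0 then
            PySem.Set.update s (PySem.List.pyGetD vid i [])
          else s) (PySem.Set.empty : PySem.Set Int)) p.1))
      = (fun p : Int × Int => decide (p.1 ∉ remKeys Tu vTu vid Tu.length)) := by
    funext p
    have hm := B_set Tu vTu vid Tu.length p.1
    simp only [PySem.Set.empty] at hm
    simp [PySem.Set.contains_eq_listContains, List.contains_eq_mem, hm]
  simp only [hq]
  have hupd := update_filter (fun x => decide (x ∉ remKeys Tu vTu vid Tu.length)) l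
    PySem.Dict.empty
  exact hupd.symm
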